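-- pv_equiv track=rewrite | github.com/bastiandg/adventofcode | 2016/day14.py | containedQuintiplet
-- ===== SOURCE A (Python) =====
-- import string
--
-- def containedQuintiplet(hash):
-- 	occurence = 100
-- 	quintipletChracter = "z"
-- 	for character in string.hexdigits:
-- 		o = hash.find(character * 5)
-- 		if o >= 0 and o < occurence:
-- 			occurence = o
-- 			quintipletChracter = character
-- 	return quintipletChracter
-- ===== SOURCE B (Python) =====
-- import string
--
--
-- def containedQuintiplet(hash):
--     i = 0
--     while i < 100 and i < len(hash):
--         c = hash[i]
--         if c in string.hexdigits and hash[i:i+5] == c * 5: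
--             return c
--         i += 1
--     return "z"
-- ===== Notes on version B (the rewrite author's own statement) =====
-- stated objective: simpler
-- what changed: Instead of running one find() scan per each of the 22 hex-digit characters and keeping the argmin, B makes a single left-to-right pass over the first 100 positions and returns the character of the first 5-run of a hex digit it meets.
import Mathlib
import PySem

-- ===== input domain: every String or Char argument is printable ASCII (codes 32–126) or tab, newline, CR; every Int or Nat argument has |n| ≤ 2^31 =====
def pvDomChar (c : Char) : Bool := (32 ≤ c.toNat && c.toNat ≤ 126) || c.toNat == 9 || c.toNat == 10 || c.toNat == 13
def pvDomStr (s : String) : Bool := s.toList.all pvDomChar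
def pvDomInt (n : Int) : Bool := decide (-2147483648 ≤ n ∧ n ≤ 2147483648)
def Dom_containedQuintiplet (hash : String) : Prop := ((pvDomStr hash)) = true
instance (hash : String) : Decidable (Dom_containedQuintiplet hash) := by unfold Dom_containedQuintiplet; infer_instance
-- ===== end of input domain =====

-- B replaces A's 22 per-hex-digit find() scans + argmin by ONE left-to-right pass over the
-- first 100 positions (objective: simpler, single pass).

-- string.hexdigits
def hexDigitsList : List Char := "0123456789abcdefABCDEF".toList

-- ===== PORT A =====
-- the body of A's for-loop: o = hash.find(character*5); if o >= 0 and o < occurence: update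
def aStep (hl : List Char) (st : Int × String) (character : Char) : Int × String :=
  let o := PySem.Chars.find hl (List.replicate 5 character)
  if 0 ≤ o ∧ o < st.1 then (o, String.ofList [character]) else st

def containedQuintiplet (hash : String) : String :=
  (hexDigitsList.foldl (aStep hash.toList) (100, "z")).2

-- ===== PORT B =====
-- the while-loop of Source B: i counts up, the list argument is hash[i:]
def altLoop (i : Nat) : List Char → String
  | [] => "z"
  | c :: rest =>
    if i < 100 then
      (if c ∈ hexDigitsList ∧ (c :: rest).take 5 = List.replicate 5 c then String.ofList [c]
       else altLoop (i + 1) rest)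
    else "z"

def containedQuintiplet_alt (hash : String) : String := altLoop 0 hash.toList

-- ===== PRECONDITION & SPEC =====
def Spec_containedQuintiplet (hash : String) (out : String) : Prop := out = containedQuintiplet_alt hash
instance (hash : String) (out : String) : Decidable (Spec_containedQuintiplet hash out) := by unfold Spec_containedQuintiplet; infer_instance

-- ===== CLAIM (what is proved, stated in full; the proofs are below) =====
def Claim_equal_containedQuintiplet : Prop := ∀ (hash : String), Dom_containedQuintiplet hash → Spec_containedQuintiplet hash (containedQuintiplet hash)

-- ===== LEMMAS AND PROOFS =====

-- a hex-digit 5-run starts at position i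
def hitAt (l : List Char) (i : Nat) : Prop :=
  ∃ c ∈ hexDigitsList, (l.drop i).take 5 = List.replicate 5 c

@[reducible] def hitAt_dec (l : List Char) : DecidablePred (fun i => i < 100 ∧ hitAt l i) := by
  intro i; unfold hitAt; infer_instance

theorem prefix_iff_take5 (c : Char) (t : List Char) :
    List.replicate 5 c <+: t ↔ t.take 5 = List.replicate 5 c := by
  rw [List.prefix_iff_eq_take, List.length_replicate]
  exact eq_comm

-- ---- B side ----

theorem altLoop_none (l : List Char) :
    ∀ (s : List Char) (k : Nat), s = l.drop k →
      (∀ i, k ≤ i → i < 100 → ¬ hitAt l i) → altLoop k s = "z" := by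
  intro s
  induction s with
  | nil => intro k _ _; simp [altLoop]
  | cons c rest ih =>
    intro k hs hno
    by_cases hk : k < 100
    · have hcond : ¬ (c ∈ hexDigitsList ∧ (c :: rest).take 5 = List.replicate 5 c) := by
        rintro ⟨hc, ht⟩
        exact hno k le_rfl hk ⟨c, hc, by rw [← hs]; exact ht⟩
      have hrest : rest = l.drop (k + 1) := by
        have := congrArg List.tail hs
        simpa [List.tail_drop] using this
      simp only [altLoop, if_pos hk, if_neg hcond]
      exact ih (k + 1) hrest (fun i h1 h2 => hno i (by omega) h2)
    · simp [altLoop, hk]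

theorem altLoop_hit (l : List Char) (i0 : Nat) (c0 : Char)
    (h100 : i0 < 100) (hc0 : c0 ∈ hexDigitsList)
    (hr : (l.drop i0).take 5 = List.replicate 5 c0)
    (hmin : ∀ j, j < i0 → ¬ hitAt l j) :
    ∀ (s : List Char) (k : Nat), s = l.drop k → k ≤ i0 → altLoop k s = String.ofList [c0] := by
  intro s
  induction s with
  | nil =>
    intro k hs hk
    exfalso
    have hnil : l.drop i0 = [] := by
      have hlen : l.length ≤ k := (List.drop_eq_nil_iff).mp hs.symm
      exact List.drop_eq_nil_iff.mpr (le_trans hlen hk)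
    rw [hnil] at hr
    simp at hr
  | cons c rest ih =>
    intro k hs hk
    have hk100 : k < 100 := lt_of_le_of_lt hk h100
    rcases eq_or_lt_of_le hk with heq | hlt
    · -- k = i0 : this is the hit
      subst heq
      have hcr : (c :: rest).take 5 = List.replicate 5 c0 := by rw [← hs] at hr; exact hr
      have hc : c = c0 := by
        have := congrArg (fun t => t.head?) hcr
        simpa using this
      subst hc
      simp [altLoop, hk100, hcr, hc0]
    · -- k < i0 : no hit here
      have hcond : ¬ (c ∈ hexDigitsList ∧ (c :: rest).take 5 = List.replicate 5 c) := by
        rintro ⟨hc, ht⟩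
        exact hmin k hlt ⟨c, hc, by rw [← hs]; exact ht⟩
      have hrest : rest = l.drop (k + 1) := by
        have := congrArg List.tail hs
        simpa [List.tail_drop] using this
      simp only [altLoop, if_pos hk100, if_neg hcond]
      exact ih (k + 1) hrest (by omega)

-- ---- A side ----

theorem fold_keep (l : List Char) (occ : Int) (q : String) :
    ∀ (cs : List Char),
      (∀ c ∈ cs, ¬ (0 ≤ PySem.Chars.find l (List.replicate 5 c) ∧
                    PySem.Chars.find l (List.replicate 5 c) < occ)) →
      cs.foldl (aStep l) (occ, q) = (occ, q) := by
  intro cs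
  induction cs with
  | nil => intro _; rfl
  | cons c cs' ih =>
    intro h
    have hc := h c (List.mem_cons_self ..)
    simp only [List.foldl_cons, aStep, if_neg hc]
    exact ih (fun c' hc' => h c' (List.mem_cons_of_mem _ hc'))

theorem fold_main (l : List Char) (i0 : Nat) (c0 : Char)
    (hfc0 : PySem.Chars.find l (List.replicate 5 c0) = (i0 : Int)) :
    ∀ (cs : List Char) (occ : Int) (q : String),
      (∀ c ∈ cs, 0 ≤ PySem.Chars.find l (List.replicate 5 c) →
                 (i0 : Int) ≤ PySem.Chars.find l (List.replicate 5 c)) →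
      (∀ c ∈ cs, PySem.Chars.find l (List.replicate 5 c) = (i0 : Int) → c = c0) →
      c0 ∈ cs → (i0 : Int) < occ →
      cs.foldl (aStep l) (occ, q) = ((i0 : Int), String.ofList [c0]) := by
  intro cs
  induction cs with
  | nil => intro occ q _ _ h; exact absurd h (List.not_mem_nil)
  | cons c cs' ih =>
    intro occ q hge huniq hmem hocc
    by_cases hc : c = c0
    · subst hc
      simp only [List.foldl_cons, aStep, hfc0]
      rw [if_pos ⟨Int.natCast_nonneg i0, hocc⟩]
      exact fold_keep l _ _ cs' (fun c' hc' hlt =>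
        absurd hlt.2 (not_lt.mpr (hge c' (List.mem_cons_of_mem _ hc') hlt.1)))
    · have hmem' : c0 ∈ cs' := by
        rcases List.mem_cons.mp hmem with h | h
        · exact absurd h.symm hc
        · exact h
      have hge' := fun c' h => hge c' (List.mem_cons_of_mem _ h)
      have huniq' := fun c' h => huniq c' (List.mem_cons_of_mem _ h)
      simp only [List.foldl_cons, aStep]
      split_ifs with hcond
      · have h1 : (i0 : Int) ≤ PySem.Chars.find l (List.replicate 5 c) :=
          hge c (List.mem_cons_self ..) hcond.1
        have h2 : PySem.Chars.find l (List.replicate 5 c) ≠ (i0 : Int) := by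
          intro h; exact hc (huniq c (List.mem_cons_self ..) h)
        exact ih _ _ hge' huniq' hmem' (lt_of_le_of_ne h1 (Ne.symm h2))
      · exact ih _ _ hge' huniq' hmem' hocc

-- find on replicate-5-of-hex patterns: nonneg results are hits
theorem find_hit (l : List Char) (c : Char) (hc : c ∈ hexDigitsList)
    (h : 0 ≤ PySem.Chars.find l (List.replicate 5 c)) :
    hitAt l (PySem.Chars.find l (List.replicate 5 c)).toNat := by
  obtain ⟨hpre, _⟩ := PySem.Chars.find_spec (s := l) (sub := List.replicate 5 c) h
  exact ⟨c, hc, (prefix_iff_take5 c _).mp hpre⟩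

-- if a hit at i0 is minimal among all hits, find(c0*5) = i0 exactly
theorem find_eq_min (l : List Char) (i0 : Nat) (c0 : Char) (hc0 : c0 ∈ hexDigitsList)
    (hr : (l.drop i0).take 5 = List.replicate 5 c0)
    (hmin : ∀ j, j < i0 → ¬ hitAt l j) :
    PySem.Chars.find l (List.replicate 5 c0) = (i0 : Int) := by
  have hpre0 : List.replicate 5 c0 <+: l.drop i0 := (prefix_iff_take5 c0 _).mpr hr
  have hnn : 0 ≤ PySem.Chars.find l (List.replicate 5 c0) := by
    rw [PySem.Chars.find_nonneg_iff]
    rw [← PySem.Chars.isIn_iff_infix, ← PySem.Chars.exists_prefix_drop_iff_isIn]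
    exact ⟨i0, hpre0⟩
  obtain ⟨hpre, hmin'⟩ := PySem.Chars.find_spec (s := l) (sub := List.replicate 5 c0) hnn
  set t := (PySem.Chars.find l (List.replicate 5 c0)).toNat with ht
  have hteq : t = i0 := by
    rcases lt_trichotomy t i0 with h | h | h
    · exact absurd ⟨c0, hc0, (prefix_iff_take5 c0 _).mp hpre⟩ (hmin t h)
    · exact h
    · exact absurd hpre0 (hmin' i0 h)
  omega

-- ===== VERDICT (by name: the statement is the Claim_ definition above) =====
theorem containedQuintiplet_spec : Claim_equal_containedQuintiplet := by
  unfold Claim_equal_containedQuintiplet Spec_containedQuintiplet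
  intro hash _
  set l := hash.toList with hl
  unfold containedQuintiplet containedQuintiplet_alt
  haveI := hitAt_dec l
  by_cases hex : ∃ i, i < 100 ∧ hitAt l i
  · -- a hex 5-run before position 100 exists; i0 = the earliest one
    set i0 := Nat.find hex with hi0def
    obtain ⟨h100, c0, hc0, hr⟩ := Nat.find_spec hex
    have hmin : ∀ j, j < i0 → ¬ hitAt l j := by
      intro j hj hhit
      exact Nat.find_min hex hj ⟨lt_trans hj h100, hhit⟩
    have hfc0 := find_eq_min l i0 c0 hc0 hr hmin
    have hge : ∀ c ∈ hexDigitsList, 0 ≤ PySem.Chars.find l (List.replicate 5 c) →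
        (i0 : Int) ≤ PySem.Chars.find l (List.replicate 5 c) := by
      intro c hc hnn
      have hhit := find_hit l c hc hnn
      have : ¬ (PySem.Chars.find l (List.replicate 5 c)).toNat < i0 :=
        fun h => hmin _ h hhit
      omega
    have huniq : ∀ c ∈ hexDigitsList,
        PySem.Chars.find l (List.replicate 5 c) = (i0 : Int) → c = c0 := by
      intro c hc hf
      have hnn : 0 ≤ PySem.Chars.find l (List.replicate 5 c) := by
        rw [hf]; exact Int.natCast_nonneg i0
      obtain ⟨hpre, _⟩ := PySem.Chars.find_spec (s := l) (sub := List.replicate 5 c) hnn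
      have htn : (PySem.Chars.find l (List.replicate 5 c)).toNat = i0 := by
        rw [hf]; exact Int.toNat_natCast i0
      rw [htn] at hpre
      have h1 := (prefix_iff_take5 c _).mp hpre
      rw [hr] at h1
      have := congrArg (fun t => t.head?) h1
      simp at this
      exact this.symm
    rw [fold_main l i0 c0 hfc0 hexDigitsList 100 "z" hge huniq hc0
          (by exact_mod_cast h100)]
    exact (altLoop_hit l i0 c0 h100 hc0 hr hmin l 0 (by simp) (Nat.zero_le _)).symm
  · -- no hex 5-run before position 100
    push Not at hex
    have hno : ∀ c ∈ hexDigitsList,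
        ¬ (0 ≤ PySem.Chars.find l (List.replicate 5 c) ∧
           PySem.Chars.find l (List.replicate 5 c) < 100) := by
      rintro c hc ⟨hnn, hlt⟩
      have hhit := find_hit l c hc hnn
      have : (PySem.Chars.find l (List.replicate 5 c)).toNat < 100 := by omega
      exact (hex _ this) hhit
    rw [fold_keep l 100 "z" hexDigitsList hno]
    exact (altLoop_none l l 0 (by simp) (fun i _ h2 h => hex i h2 h)).symm
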